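-- pv_equiv track=rewrite | github.com/datacommonsorg/data | scripts/statvar/mcf_file_util.py | strip_namespace
-- ===== SOURCE A (Python) =====
-- def strip_namespace(value: str) -> str:
--     '''Returns the value without the namespace prefix.
--     Args:
--       value: string from which the namespace prefix is to be removed.
--     Returns:
--       value without the namespace prefix if there was a namespace
--
--     Any sequence of letters followed by a ':' is treated as a namespace.
--     Quoted strings are assumed to start with '"' and won't be filtered.
--     '''
--     if value and isinstance(value, str):
--         pos = 0
--         len_value = len(value)
--         while (pos < len_value):
--             if not value[pos].isalpha():
--                 break
--             pos += 1
--         if pos < len_value and value[pos] == ':':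
--             return value[pos + 1:].strip()
--     return value
-- ===== SOURCE B (Python) =====
-- def strip_namespace(value: str) -> str:
--     if value and isinstance(value, str):
--         prefix, sep, rest = value.partition(':')
--         if sep and (prefix == '' or prefix.isalpha()):
--             return rest.strip()
--     return value
-- ===== Notes on version B (the rewrite author's own statement) =====
-- stated objective: faster
-- what changed: Replaces the manual index-based alpha-scanning while loop with str.partition at the first colon plus a prefix predicate (empty or all-alphabetic).
import Mathlib
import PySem

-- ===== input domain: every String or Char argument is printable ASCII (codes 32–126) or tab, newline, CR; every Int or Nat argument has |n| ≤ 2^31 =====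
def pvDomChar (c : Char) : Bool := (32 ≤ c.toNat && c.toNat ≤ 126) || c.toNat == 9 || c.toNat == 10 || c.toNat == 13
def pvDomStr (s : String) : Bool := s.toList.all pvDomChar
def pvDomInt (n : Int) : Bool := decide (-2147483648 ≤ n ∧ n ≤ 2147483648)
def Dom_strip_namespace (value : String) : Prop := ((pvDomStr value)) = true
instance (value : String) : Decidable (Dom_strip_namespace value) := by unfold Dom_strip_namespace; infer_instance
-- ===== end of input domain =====

-- B replaces A's manual index-based alpha-scanning while loop with a partition at the
-- first colon plus a prefix predicate; same return value, no side effects.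

-- ===== PORT A =====
-- the while loop: advance pos while value[pos].isalpha(); returns the final pos
def pvAScan : List Char → Nat
  | [] => 0
  | c :: rest => if PySem.Chars.isalpha c then pvAScan rest + 1 else 0

def strip_namespace (value : String) : String :=
  if value = "" then value
  else
    let cs := value.toList
    let pos := pvAScan cs
    -- 'pos < len_value and value[pos] == ':''
    match cs[pos]? with
    | some c => if c = ':' then String.ofList (PySem.Chars.strip (cs.drop (pos + 1))) else value
    | none => value

-- ===== PORT B =====
def strip_namespace_alt (value : String) : String :=
  if value = "" then value
  else
    let cs := value.toList
    -- prefix, sep, rest = value.partition(':')  (sep nonempty iff a ':' occurs)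
    let pre := cs.takeWhile (· ≠ ':')
    match cs.dropWhile (· ≠ ':') with
    | _ :: rest =>
        if pre.isEmpty || PySem.Chars.strIsalpha pre
        then String.ofList (PySem.Chars.strip rest)    -- rest.strip()
        else value
    | [] => value

-- ===== PRECONDITION & SPEC =====
def Spec_strip_namespace (value : String) (out : String) : Prop := out = strip_namespace_alt value
instance (value : String) (out : String) : Decidable (Spec_strip_namespace value out) := by unfold Spec_strip_namespace; infer_instance

-- ===== CLAIM (what is proved, stated in full; the proofs are below) =====
def Claim_equal_strip_namespace : Prop := ∀ (value : String), Dom_strip_namespace value → Spec_strip_namespace value (strip_namespace value)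

-- ===== LEMMAS AND PROOFS =====

-- the two cores, as Option (List Char): some r ↔ the function returns r.strip()
def pvCoreA (cs : List Char) : Option (List Char) :=
  match cs[pvAScan cs]? with
  | some c => if c = ':' then some (cs.drop (pvAScan cs + 1)) else none
  | none => none

def pvCoreB (cs : List Char) : Option (List Char) :=
  match cs.dropWhile (· ≠ ':') with
  | _ :: rest =>
      if (cs.takeWhile (· ≠ ':')).isEmpty || PySem.Chars.strIsalpha (cs.takeWhile (· ≠ ':'))
      then some rest else none
  | [] => none

lemma pvCore_eq (cs : List Char) : pvCoreA cs = pvCoreB cs := by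
  induction cs with
  | nil => rfl
  | cons c rest ih =>
    by_cases hc : c = ':'
    · subst hc
      simp [pvCoreA, pvCoreB, pvAScan, show PySem.Chars.isalpha ':' = false from rfl]
    · have hdw : List.dropWhile (fun x => decide (x ≠ ':')) (c :: rest)
          = List.dropWhile (fun x => decide (x ≠ ':')) rest := by
        simp [hc]
      have htw : List.takeWhile (fun x => decide (x ≠ ':')) (c :: rest)
          = c :: List.takeWhile (fun x => decide (x ≠ ':')) rest := by
        simp [hc]
      by_cases ha : PySem.Chars.isalpha c = true
      · -- alpha head: both cores defer to the tail
        have hcond : ((c :: List.takeWhile (fun x => decide (x ≠ ':')) rest).isEmpty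
            || PySem.Chars.strIsalpha (c :: List.takeWhile (fun x => decide (x ≠ ':')) rest))
            = ((List.takeWhile (fun x => decide (x ≠ ':')) rest).isEmpty
            || PySem.Chars.strIsalpha (List.takeWhile (fun x => decide (x ≠ ':')) rest)) := by
          cases hp : List.takeWhile (fun x => decide (x ≠ ':')) rest <;>
            simp [PySem.Chars.strIsalpha, ha]
        have hA : pvCoreA (c :: rest) = pvCoreA rest := by
          simp [pvCoreA, pvAScan, ha]
        have hB : pvCoreB (c :: rest) = pvCoreB rest := by
          unfold pvCoreB
          rw [hdw, htw, hcond]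
        rw [hA, hB, ih]
      · -- non-alpha, non-colon head: both cores are none
        have hA : pvCoreA (c :: rest) = none := by
          simp [pvCoreA, pvAScan, ha, hc]
        have hB : pvCoreB (c :: rest) = none := by
          unfold pvCoreB
          rw [hdw, htw]
          cases List.dropWhile (fun x => decide (x ≠ ':')) rest <;>
            simp [PySem.Chars.strIsalpha, ha]
        rw [hA, hB]

lemma pvA_core (value : String) :
    strip_namespace value =
      match pvCoreA value.toList with
      | some r => String.ofList (PySem.Chars.strip r)
      | none => value := by
  unfold strip_namespace pvCoreA
  by_cases h : value = ""
  · subst h; rfl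
  · simp only [if_neg h]
    cases hg : value.toList[pvAScan value.toList]? with
    | none => rfl
    | some d => by_cases hd : d = ':' <;> simp [hd]

lemma pvB_core (value : String) :
    strip_namespace_alt value =
      match pvCoreB value.toList with
      | some r => String.ofList (PySem.Chars.strip r)
      | none => value := by
  unfold strip_namespace_alt pvCoreB
  by_cases h : value = ""
  · subst h; rfl
  · simp only [if_neg h]
    cases hg : value.toList.dropWhile (· ≠ ':') with
    | nil => rfl
    | cons d tl => split_ifs with hC <;> rfl

-- ===== VERDICT (by name: the statement is the Claim_ definition above) =====
theorem strip_namespace_spec : Claim_equal_strip_namespace := by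
  intro value _
  unfold Spec_strip_namespace
  rw [pvA_core, pvB_core, pvCore_eq]
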